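-- pv_equiv track=rewrite | github.com/raghavbharadwaj/pos-tagging | part-1-corrections/percepclassify.py | wordclass
-- ===== SOURCE A (Python) =====
-- def wordclass(features,weights):
-- 	pred_sum=0
-- 	pred_label=""
-- 	for label in weights.keys():
-- 		temp_sum=0
-- 		for feat in features:
-- 			if feat in weights[label]:
-- 				temp_sum += weights[label][feat]
-- 		if temp_sum >= pred_sum:
-- 			pred_sum = temp_sum
-- 			pred_label=label
-- 	return pred_label
-- ===== SOURCE B (Python) =====
-- def wordclass(features, weights):
-- 	scores = dict.fromkeys(weights, 0)
-- 	for feat in features: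
-- 		for label, row in weights.items():
-- 			if feat in row:
-- 				scores[label] += row[feat]
-- 	best_sum = 0
-- 	best_label = ""
-- 	for label in weights:
-- 		if scores[label] >= best_sum:
-- 			best_sum = scores[label]
-- 			best_label = label
-- 	return best_label
-- ===== Notes on version B (the rewrite author's own statement) =====
-- stated objective: alternative
-- what changed: B transposes the nested loops: it builds a full per-label score table (features outer, labels inner) and then runs a separate argmax pass over the table, instead of A's per-label on-the-fly summation inside the argmax loop.
import Mathlib
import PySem

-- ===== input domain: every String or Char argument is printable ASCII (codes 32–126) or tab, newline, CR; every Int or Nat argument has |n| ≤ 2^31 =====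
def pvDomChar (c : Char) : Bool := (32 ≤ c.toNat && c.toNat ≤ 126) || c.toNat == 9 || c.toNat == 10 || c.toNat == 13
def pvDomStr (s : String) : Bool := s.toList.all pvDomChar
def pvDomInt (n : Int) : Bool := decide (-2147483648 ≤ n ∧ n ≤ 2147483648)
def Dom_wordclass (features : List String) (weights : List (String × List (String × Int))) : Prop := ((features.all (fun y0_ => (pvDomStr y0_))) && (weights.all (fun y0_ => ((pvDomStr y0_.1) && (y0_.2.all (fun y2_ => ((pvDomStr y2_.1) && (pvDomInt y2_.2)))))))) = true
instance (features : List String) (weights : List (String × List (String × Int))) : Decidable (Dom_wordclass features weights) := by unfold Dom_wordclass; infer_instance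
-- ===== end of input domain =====

-- B transposes the loops: it first builds the complete score table (features outer, label rows inner,
-- iterating weights.items() so each row is fetched once), then selects the best label in a separate
-- argmax pass; a different decomposition of the same work.

-- ===== PORT A =====
def wordclass (features : List String) (weights : List (String × List (String × Int))) : String :=
  let wd := PySem.Dict.mk weights
  (wd.keys.foldl (fun st label =>
     let row := PySem.Dict.mk (wd.getD label [])
     let temp := features.foldl (fun s f => if row.contains f then s + row.getD f 0 else s) (0 : Int)
     if st.1 ≤ temp then (temp, label) else st) ((0 : Int), "")).2

-- ===== PORT B =====
def wordclass_alt (features : List String) (weights : List (String × List (String × Int))) : String :=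
  let wd := PySem.Dict.mk weights
  let scores0 : PySem.Dict String Int :=
    wd.keys.foldl (fun d l => d.insert l 0) PySem.Dict.empty
  let scores := features.foldl (fun d f =>
      wd.items.foldl (fun d p =>
        let row := PySem.Dict.mk p.2
        if row.contains f then d.insert p.1 (d.getD p.1 0 + row.getD f 0) else d) d) scores0
  (wd.keys.foldl (fun st l =>
     let s := scores.getD l 0
     if st.1 ≤ s then (s, l) else st) ((0 : Int), "")).2

-- ===== PRECONDITION & SPEC =====
-- Pre_ excludes association lists with duplicate top-level labels: such lists do not represent
-- any Python dict (a dict collapses duplicate keys), so the list encoding is ambiguous there.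
def Pre_wordclass (features : List String) (weights : List (String × List (String × Int))) : Prop :=
  (weights.map Prod.fst).Nodup
instance (features : List String) (weights : List (String × List (String × Int))) : Decidable (Pre_wordclass features weights) := by unfold Pre_wordclass; infer_instance
def pvWitness_wordclass : List String × (List (String × List (String × Int))) :=
  (["x", "y"], [("N", [("x", 2), ("y", -1)]), ("V", [("x", 1)])])
def Spec_wordclass (features : List String) (weights : List (String × List (String × Int))) (out : String) : Prop := out = wordclass_alt features weights
instance (features : List String) (weights : List (String × List (String × Int))) (out : String) : Decidable (Spec_wordclass features weights out) := by unfold Spec_wordclass; infer_instance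

-- ===== CLAIM (what is proved, stated in full; the proofs are below) =====
def Claim_equal_wordclass : Prop := ∀ (features : List String) (weights : List (String × List (String × Int))), Dom_wordclass features weights → Pre_wordclass features weights → Spec_wordclass features weights (wordclass features weights)

-- ===== LEMMAS AND PROOFS =====

-- contribution of feature f taken from a row list r
def pvContrib (r : List (String × Int)) (f : String) : Int :=
  let row := PySem.Dict.mk r
  if row.contains f then row.getD f 0 else 0

-- the score-table initialisation puts 0 at every key of ks
theorem pv_getD_init (ks : List String) (d : PySem.Dict String Int) (l : String) :
    (ks.foldl (fun d l => d.insert l 0) d).getD l 0 =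
      if l ∈ ks then 0 else d.getD l 0 := by
  induction ks generalizing d with
  | nil => simp
  | cons k ks ih =>
      simp only [List.foldl_cons, ih, PySem.Dict.getD_insert, List.mem_cons]
      by_cases h1 : l ∈ ks <;> by_cases h2 : l = k <;> simp [h1, h2]

-- a pass over rows whose labels avoid l leaves key l unchanged
theorem pv_untouched (f : String) (ps : List (String × List (String × Int)))
    (l : String) (hnot : l ∉ ps.map Prod.fst) (d : PySem.Dict String Int) :
    (ps.foldl (fun d p =>
        let row := PySem.Dict.mk p.2
        if row.contains f then d.insert p.1 (d.getD p.1 0 + row.getD f 0) else d) d).getD l 0 =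
      d.getD l 0 := by
  induction ps generalizing d with
  | nil => simp
  | cons q ps' ih' =>
      have h1 : l ∉ ps'.map Prod.fst := fun h => hnot (List.mem_cons_of_mem _ h)
      have hne : l ≠ q.1 := fun h => hnot (h ▸ List.mem_cons_self ..)
      simp only [List.map_cons] at hnot
      simp only [List.foldl_cons]
      rw [ih' h1]
      split
      · rw [PySem.Dict.getD_insert]; simp [hne]
      · rfl

-- one inner pass over the (duplicate-free) items list adds exactly pvContrib r f at key l
theorem pv_inner_step (f : String) (ps : List (String × List (String × Int)))
    (hnd : (ps.map Prod.fst).Nodup) (d : PySem.Dict String Int)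
    (l : String) (r : List (String × Int)) (hl : (l, r) ∈ ps) :
    (ps.foldl (fun d p =>
        let row := PySem.Dict.mk p.2
        if row.contains f then d.insert p.1 (d.getD p.1 0 + row.getD f 0) else d) d).getD l 0 =
      d.getD l 0 + pvContrib r f := by
  induction ps generalizing d with
  | nil => simp at hl
  | cons q ps ih =>
      simp only [List.map_cons, List.nodup_cons] at hnd
      rcases List.mem_cons.mp hl with h | h
      · subst h
        have hnot : l ∉ ps.map Prod.fst := hnd.1
        simp only [List.foldl_cons, pvContrib]
        rw [pv_untouched f ps l hnot]
        split
        · rw [PySem.Dict.getD_insert]; simp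
        · simp
      · have hne : l ≠ q.1 := fun he =>
          hnd.1 (he ▸ List.mem_map_of_mem (f := Prod.fst) h)
        simp only [List.foldl_cons]
        rw [ih hnd.2 _ h]
        split
        · rw [PySem.Dict.getD_insert]; simp [hne]
        · rfl

-- after the whole double loop, the table holds label l's total score
theorem pv_table (features : List String) (ps : List (String × List (String × Int)))
    (hnd : (ps.map Prod.fst).Nodup) (d : PySem.Dict String Int)
    (l : String) (r : List (String × Int)) (hl : (l, r) ∈ ps) :
    (features.foldl (fun d f =>
        ps.foldl (fun d p =>
          let row := PySem.Dict.mk p.2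
          if row.contains f then d.insert p.1 (d.getD p.1 0 + row.getD f 0) else d) d) d).getD l 0 =
      features.foldl (fun s f => s + pvContrib r f) (d.getD l 0) := by
  induction features generalizing d with
  | nil => rfl
  | cons f fs ih =>
      simp only [List.foldl_cons]
      rw [ih, pv_inner_step f ps hnd d l r hl]

-- ===== VERDICT (by name: the statement is the Claim_ definition above) =====
theorem wordclass_spec : Claim_equal_wordclass := by
  intro features weights _ hpre
  unfold Spec_wordclass wordclass wordclass_alt
  simp only []
  set wd := PySem.Dict.mk weights with hwd
  have hnd : (wd.items.map Prod.fst).Nodup := hpre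
  apply congrArg Prod.snd
  apply PySem.List.foldl_congr_mem
  intro acc l hl
  -- l ∈ wd.keys gives its (unique) row r
  obtain ⟨⟨l, r⟩, hmem, rfl⟩ := List.mem_map.mp hl
  have hrow : wd.getD l [] = r := PySem.Dict.getD_of_mem_items wd hmem hnd []
  have hscore :
      ((features.foldl (fun d f =>
          wd.items.foldl (fun d p =>
            let row := PySem.Dict.mk p.2
            if row.contains f then d.insert p.1 (d.getD p.1 0 + row.getD f 0) else d) d)
          (wd.keys.foldl (fun d l => d.insert l 0) PySem.Dict.empty)).getD l 0) =
      features.foldl (fun s f =>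
          let row := PySem.Dict.mk (wd.getD l [])
          if row.contains f then s + row.getD f 0 else s) (0 : Int) := by
    rw [pv_table features wd.items hnd _ l r hmem, pv_getD_init, if_pos hl]
    apply PySem.List.foldl_congr_mem
    intro s f _
    simp only [pvContrib, hrow]
    split <;> simp
  rw [hscore]
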